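-- pv_equiv track=rewrite | github.com/Tzishi/CSCI-4511W | Search/helper.py | makeBoxes
-- ===== SOURCE A (Python) =====
-- def makeBoxes(Alist, bRows, bCols):
--     # Alist is list of lists of rows in nxn puzzle
--     # brows, bcols are dimensions of inner box (e.g. 6x6 puzzle is made of 6 2x3 boxes, so makeBoxes(Alist,2,3)
--     # This composes the inner boxes, numbering from top to bottom, left to right.
--     # For example 6x6 = | box 0 | box 2 |
--     #                   | box 1 | box 3 |
--
--     puzzleSize = len(Alist)
--     boxesAcrossCols = puzzleSize // bCols
--     boxesDownRows = puzzleSize // bRows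
--     boxesTotal = boxesAcrossCols * boxesDownRows
--
--     boxes = [ [] for b in range( boxesTotal )]
--     for b in range( boxesTotal ):
--         # Take all relevant column values from the bRows relevant to box "b"
--         # For example, box 3 from above is composed of rows 2,3 and cols 2,3
--         for row in range( b%boxesDownRows*bRows, b%boxesDownRows*bRows+bRows ):
--             boxes[b].extend( Alist[row][b//boxesDownRows*bCols : b//boxesDownRows*bCols+bCols] )
--     return boxes
-- ===== SOURCE B (Python) =====
-- def makeBoxes(Alist, bRows, bCols):
--     # Staged pipeline instead of A's per-box index-arithmetic gather:
--     # 1) pre-chunk every relevant row once into `across` fixed slots of width bCols,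
--     # 2) group the chunked rows into horizontal bands of bRows rows,
--     # 3) each box is column j of one band, flattened; emit column-group-major.
--     n = len(Alist)
--     across = n // bCols
--     down = n // bRows
--     grid = [[row[j * bCols : (j + 1) * bCols] for j in range(across)]
--             for row in Alist[:down * bRows]]
--     bands = [grid[i * bRows : (i + 1) * bRows] for i in range(down)]
--     return [[v for crow in band for v in crow[j]]
--             for j in range(across) for band in bands]
-- ===== Notes on version B (the rewrite author's own statement) =====
-- stated objective: alternative
-- what changed: Replaces A's per-box gather (loop over box numbers, re-deriving each box's rows and column slice from b%down and b//down and mutating a preallocated list) by a staged pipeline with no box-index arithmetic and no mutation: every row is pre-chunked once into a 2D grid of width-bCols slots, the chunked rows are grouped into bands of bRows rows, and each box is read off as one flattened column of one band.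
-- outside the precondition, e.g. on makeBoxes([[1]], 0, 1): A raises ZeroDivisionError, B raises ZeroDivisionError; on makeBoxes([[1], [2]], -1, -1): A returns [[], [], [], []], B returns []
import Mathlib
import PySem

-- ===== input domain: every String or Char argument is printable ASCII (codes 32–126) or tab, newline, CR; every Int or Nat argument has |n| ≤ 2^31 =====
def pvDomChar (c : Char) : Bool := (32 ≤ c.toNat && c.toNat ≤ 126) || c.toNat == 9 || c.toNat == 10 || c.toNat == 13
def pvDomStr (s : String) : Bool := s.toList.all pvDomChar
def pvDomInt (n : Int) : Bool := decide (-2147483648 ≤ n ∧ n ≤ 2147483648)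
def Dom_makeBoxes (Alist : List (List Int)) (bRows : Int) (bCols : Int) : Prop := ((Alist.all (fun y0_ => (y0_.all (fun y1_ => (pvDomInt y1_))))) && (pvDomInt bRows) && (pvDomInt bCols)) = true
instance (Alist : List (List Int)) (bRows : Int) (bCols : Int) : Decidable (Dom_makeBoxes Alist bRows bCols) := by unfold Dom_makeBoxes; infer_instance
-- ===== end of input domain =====

-- B replaces A's per-box index-arithmetic gather by a staged pipeline (pre-chunk rows into a grid, band the grid, read each box off as a flattened band column) — alternative decomposition, same cost.

-- ===== PORT A =====
def makeBoxes (Alist : List (List Int)) (bRows : Int) (bCols : Int) : List (List Int) :=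
  let puzzleSize : Int := Alist.length
  let boxesAcrossCols := PySem.Int.floordiv puzzleSize bCols
  let boxesDownRows := PySem.Int.floordiv puzzleSize bRows
  let boxesTotal := boxesAcrossCols * boxesDownRows
  let boxes := (PySem.List.pyRange 0 boxesTotal 1).map (fun _ => ([] : List Int))
  (PySem.List.pyRange 0 boxesTotal 1).foldl (fun boxes b =>
    (PySem.List.pyRange (PySem.Int.mod b boxesDownRows * bRows)
        (PySem.Int.mod b boxesDownRows * bRows + bRows) 1).foldl (fun boxes row =>
      PySem.List.pySetD boxes b (PySem.List.pyGetD boxes b [] ++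
        PySem.List.slice (PySem.List.pyGetD Alist row [])
          (some (PySem.Int.floordiv b boxesDownRows * bCols))
          (some (PySem.Int.floordiv b boxesDownRows * bCols + bCols)))) boxes) boxes

-- ===== PORT B =====
def makeBoxes_alt (Alist : List (List Int)) (bRows : Int) (bCols : Int) : List (List Int) :=
  let n : Int := Alist.length
  let across := PySem.Int.floordiv n bCols
  let down := PySem.Int.floordiv n bRows
  let grid := (PySem.List.slice Alist none (some (down * bRows))).map (fun row =>
    (PySem.List.pyRange 0 across 1).map (fun j =>
      PySem.List.slice row (some (j * bCols)) (some ((j + 1) * bCols))))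
  let bands := (PySem.List.pyRange 0 down 1).map (fun i =>
    PySem.List.slice grid (some (i * bRows)) (some ((i + 1) * bRows)))
  (PySem.List.pyRange 0 across 1).flatMap (fun j =>
    bands.map (fun band => band.flatMap (fun crow => PySem.List.pyGetD crow j [])))

-- ===== PRECONDITION & SPEC =====
-- Pre_ excludes bRows = 0 / bCols = 0 (A raises ZeroDivisionError) and the nonsense box shape
-- with both dimensions negative on a nonempty grid, where A returns a positive number of empty
-- boxes only because its two negative floor-divisions multiply to a positive box count, while
-- B's empty stage ranges yield []; neither value is specified for negative box dimensions.
def Pre_makeBoxes (Alist : List (List Int)) (bRows : Int) (bCols : Int) : Prop :=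
  bRows ≠ 0 ∧ bCols ≠ 0 ∧ (0 < bRows ∨ 0 < bCols ∨ Alist = [])
instance (Alist : List (List Int)) (bRows : Int) (bCols : Int) : Decidable (Pre_makeBoxes Alist bRows bCols) := by unfold Pre_makeBoxes; infer_instance

def pvWitness_makeBoxes : List (List Int) × Int × Int := ([[1, 2], [3, 4]], 1, 2)

def Spec_makeBoxes (Alist : List (List Int)) (bRows : Int) (bCols : Int) (out : List (List Int)) : Prop := out = makeBoxes_alt Alist bRows bCols
instance (Alist : List (List Int)) (bRows : Int) (bCols : Int) (out : List (List Int)) : Decidable (Spec_makeBoxes Alist bRows bCols out) := by unfold Spec_makeBoxes; infer_instance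

-- ===== CLAIM (what is proved, stated in full; the proofs are below) =====
def Claim_equal_makeBoxes : Prop := ∀ (Alist : List (List Int)) (bRows : Int) (bCols : Int), Dom_makeBoxes Alist bRows bCols → Pre_makeBoxes Alist bRows bCols → Spec_makeBoxes Alist bRows bCols (makeBoxes Alist bRows bCols)

-- ===== LEMMAS AND PROOFS =====

-- one appended-extend update of the boxes list, at a Nat index
def pvUpd (bx : List (List Int)) (p : Nat × List Int) : List (List Int) :=
  bx.set p.1 (bx.getD p.1 [] ++ p.2)

-- the bCols-wide chunk j of row r (what both Pythons slice out)
def pvChunk (Alist : List (List Int)) (c r j : Nat) : List Int :=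
  ((Alist.getD r []).drop (j * c)).take c

-- the update stream of A's loop, and the initial list of empty boxes
def pvLA (Alist : List (List Int)) (m c : Nat) : List (Nat × List Int) :=
  (List.range (Alist.length / c * (Alist.length / m))).flatMap (fun b =>
    (List.range m).map (fun s =>
      (b, pvChunk Alist c (b % (Alist.length / m) * m + s) (b / (Alist.length / m)))))

def pvInit (Alist : List (List Int)) (m c : Nat) : List (List Int) :=
  (List.range (Alist.length / c * (Alist.length / m))).map (fun _ => ([] : List Int))

-- the content of box b (shared normal form of both sides)
def pvG (Alist : List (List Int)) (m c d : Nat) (b : Nat) : List Int :=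
  (List.range m).flatMap (fun s => pvChunk Alist c (b % d * m + s) (b / d))

theorem pvFdivNonpos (a b : Int) (ha : 0 ≤ a) (hb : b < 0) :
    PySem.Int.floordiv a b ≤ 0 := by
  show a.fdiv b ≤ 0
  rw [Int.fdiv_eq_ediv]
  have h1 : a / b ≤ 0 := Int.ediv_nonpos_of_nonneg_of_nonpos ha hb.le
  split_ifs <;> omega

theorem pvFoldlUpdGet (L : List (Nat × List Int)) (bx : List (List Int)) (b : Nat) :
    (L.foldl pvUpd bx)[b]? =
      (bx[b]?).map (· ++ (L.filter (fun p => p.1 == b)).flatMap (·.2)) := by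
  induction L generalizing bx with
  | nil => cases h : bx[b]? <;> simp [h]
  | cons p L ih =>
      rw [List.foldl_cons, ih]
      by_cases hlen : p.1 < bx.length
      · have hg : bx[p.1]? = some (bx.getD p.1 []) := by
          rw [List.getD_eq_getElem?_getD, List.getElem?_eq_getElem hlen]
          rfl
        by_cases h : p.1 = b
        · subst h
          have hset : (pvUpd bx p)[p.1]? = some (bx.getD p.1 [] ++ p.2) := by
            simp [pvUpd, hlen]
          rw [hset, hg]
          simp [List.append_assoc]
        · have hset : (pvUpd bx p)[b]? = bx[b]? := by
            simp [pvUpd, h]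
          rw [hset]
          simp [h]
      · have hle : bx.length ≤ p.1 := by omega
        have hset : pvUpd bx p = bx := by
          unfold pvUpd
          rw [List.set_eq_of_length_le hle]
        rw [hset]
        by_cases h : p.1 = b
        · have hb : bx[b]? = none := by
            rw [List.getElem?_eq_none_iff]
            omega
          simp [hb, h]
        · simp [h]

theorem pvFilterFlatMap {α β : Type} (l : List α) (f : α → List β) (p : β → Bool) :
    (l.flatMap f).filter p = l.flatMap (fun x => (f x).filter p) := by
  induction l with
  | nil => rfl
  | cons x l ih => simp [List.filter_append, ih]

theorem pvFlatMapCongr {α β : Type} (l : List α) (f g : α → List β)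
    (h : ∀ x ∈ l, f x = g x) : l.flatMap f = l.flatMap g := by
  induction l with
  | nil => rfl
  | cons x l ih =>
      simp only [List.flatMap_cons, h x (by simp)]
      rw [ih (fun y hy => h y (by simp [hy]))]

theorem pvFlatMapRangeSingle {γ : Type} (n b : Nat) (f : Nat → List γ) (hb : b < n) :
    (List.range n).flatMap (fun x => if x = b then f x else []) = f b := by
  induction n with
  | zero => omega
  | succ n ih =>
      rw [List.range_succ, List.flatMap_append]
      by_cases h : b = n
      · subst h
        have : (List.range b).flatMap (fun x => if x = b then f x else []) = [] := by
          rw [List.flatMap_eq_nil_iff]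
          intro x hx
          simp only [List.mem_range] at hx
          simp [Nat.ne_of_lt hx]
        simp [this]
      · have hb' : b < n := by omega
        simp [ih hb', Ne.symm h]

theorem pvRangeMulFlat (d m : Nat) :
    List.range (d * m) = (List.range d).flatMap (fun q => (List.range m).map (fun s => q * m + s)) := by
  induction d with
  | zero => simp
  | succ d ih =>
      rw [Nat.succ_mul, List.range_add, List.range_succ, List.flatMap_append, ih]
      simp

theorem pvRangeCastAdd (x m : Nat) :
    PySem.List.pyRange (x : Int) (((x + m : Nat) : Int)) 1 =
      (List.range m).map (fun k => ((x + k : Nat) : Int)) := by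
  rw [PySem.List.pyRange_one]
  simp

theorem pvSliceCast {α : Type} (xs : List α) (j n : Nat) :
    PySem.List.slice xs (some (j : Int)) (some ((j + n : Nat) : Int)) = (xs.drop j).take n := by
  push_cast
  exact PySem.List.slice_natCast_add xs j n

theorem pvA_nat (Alist : List (List Int)) (m c : Nat) :
    makeBoxes Alist (m : Int) (c : Int) = (pvLA Alist m c).foldl pvUpd (pvInit Alist m c) := by
  simp only [makeBoxes, pvLA, pvInit, pvUpd, pvChunk,
    PySem.Int.floordiv_natCast, PySem.Int.mod_natCast, ← Nat.cast_mul,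
    PySem.List.pyRange_zero_natCast, List.foldl_map, List.map_map,
    pvRangeCastAdd, ← Nat.cast_add, Function.comp_def,
    PySem.List.pySetD_natCast, PySem.List.pyGetD_natCast,
    pvSliceCast, List.foldl_flatMap]

theorem pvFilterA (Alist : List (List Int)) (m c : Nat) (b : Nat)
    (hb : b < Alist.length / c * (Alist.length / m)) :
    ((pvLA Alist m c).filter (fun p => p.1 == b)).flatMap (·.2) =
      pvG Alist m c (Alist.length / m) b := by
  unfold pvLA pvG
  rw [pvFilterFlatMap, List.flatMap_assoc]
  rw [pvFlatMapCongr _ _ (fun b' => if b' = b then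
        (List.range m).flatMap (fun s =>
          pvChunk Alist c (b' % (Alist.length / m) * m + s) (b' / (Alist.length / m))) else [])
      ?side]
  · exact pvFlatMapRangeSingle _ b _ hb
  case side =>
    intro b' _
    by_cases h : b' = b
    · subst h
      simp [List.filter_map, Function.comp_def, List.flatMap_map]
    · simp [List.filter_map, Function.comp_def, h]

-- take m of drop k, written as a range scan (used to read a band out of the grid)
theorem pvTakeDropMap {α : Type} [Inhabited α] (l : List α) (k m : Nat) (h : k + m ≤ l.length) :
    (l.drop k).take m = (List.range m).map (fun s => l.getD (k + s) default) := by
  apply List.ext_getElem?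
  intro s
  by_cases hs : s < m
  · rw [List.getElem?_take, if_pos hs, List.getElem?_drop]
    have hks : k + s < l.length := by omega
    rw [List.getElem?_eq_getElem hks,
      List.getElem?_map, List.getElem?_range hs]
    simp [List.getD_eq_getElem?_getD, List.getElem?_eq_getElem hks]
  · rw [List.getElem?_take, if_neg hs]
    have : (List.range m).length ≤ s := by simpa using Nat.le_of_not_lt hs
    rw [List.getElem?_eq_none_iff.mpr (by simpa using this)]

-- a j-outer/i-inner double loop is a single map over the box numbers
theorem pvDoubleLoop (a d : Nat) (H : Nat → Nat → List Int) :
    (List.range a).flatMap (fun q => (List.range d).map (fun s => H q s)) =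
      (List.range (a * d)).map (fun b => H (b / d) (b % d)) := by
  rw [pvRangeMulFlat a d, List.map_flatMap]
  apply pvFlatMapCongr
  intro q _
  rw [List.map_map]
  apply List.map_congr_left
  intro s hs
  simp only [List.mem_range] at hs
  have hd : 0 < d := by omega
  have hdiv : (q * d + s) / d = q := by
    rw [Nat.mul_comm q d, Nat.mul_add_div hd, Nat.div_eq_of_lt hs]
    omega
  have hmod : (q * d + s) % d = s := by
    rw [Nat.mul_comm q d, Nat.mul_add_mod, Nat.mod_eq_of_lt hs]
  simp [hdiv, hmod]

theorem pvB_nat (Alist : List (List Int)) (m c : Nat) :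
    makeBoxes_alt Alist (m : Int) (c : Int) =
      (List.range (Alist.length / c * (Alist.length / m))).map
        (pvG Alist m c (Alist.length / m)) := by
  have hcast1 : ∀ (i k : Nat), ((i : Int) + 1) * (k : Int) = ((i * k + k : Nat) : Int) := by
    intro i k; push_cast; ring
  have hcast2 : ∀ (i k : Nat), (i : Int) * (k : Int) = ((i * k : Nat) : Int) := by
    intro i k; push_cast; ring
  have hdm : Alist.length / m * m ≤ Alist.length := Nat.div_mul_le_self _ _
  have hslice : PySem.List.slice Alist none (some ((Alist.length / m * m : Nat) : Int)) =
      Alist.take (Alist.length / m * m) := by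
    rw [PySem.List.slice_to _ (by positivity), Int.toNat_natCast]
  simp only [makeBoxes_alt, PySem.Int.floordiv_natCast,
    PySem.List.pyRange_zero_natCast, List.flatMap_map, List.map_map,
    Function.comp_def, hcast1, hcast2, PySem.List.pyGetD_natCast,
    pvSliceCast, hslice]
  rw [pvDoubleLoop]
  apply List.map_congr_left
  intro b hb
  simp only [List.mem_range] at hb
  have hd0 : 0 < Alist.length / m := by
    rcases Nat.eq_zero_or_pos (Alist.length / m) with h | h
    · rw [h] at hb; omega
    · exact h
  have hja : b / (Alist.length / m) < Alist.length / c :=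
    (Nat.div_lt_iff_lt_mul hd0).mpr hb
  have hid : b % (Alist.length / m) < Alist.length / m := Nat.mod_lt _ hd0
  have hband : b % (Alist.length / m) * m + m ≤ Alist.length / m * m := by
    have h1 : b % (Alist.length / m) + 1 ≤ Alist.length / m := hid
    calc b % (Alist.length / m) * m + m = (b % (Alist.length / m) + 1) * m := by ring
      _ ≤ Alist.length / m * m := Nat.mul_le_mul_right m h1
  have hglen : ((Alist.take (Alist.length / m * m)).map (fun row =>
      (List.range (Alist.length / c)).map (fun j => (row.drop (j * c)).take c))).length =
      Alist.length / m * m := by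
    simp [Nat.min_eq_left hdm]
  rw [pvTakeDropMap _ _ _ (by rw [hglen]; exact hband)]
  rw [List.flatMap_map]
  unfold pvG
  apply pvFlatMapCongr
  intro s hs
  simp only [List.mem_range] at hs
  have hr : b % (Alist.length / m) * m + s < Alist.length / m * m := by omega
  have hrn : b % (Alist.length / m) * m + s < Alist.length := lt_of_lt_of_le hr hdm
  have hgget : ((Alist.take (Alist.length / m * m)).map (fun row =>
        (List.range (Alist.length / c)).map (fun j => (row.drop (j * c)).take c))).getD
        (b % (Alist.length / m) * m + s) default =
      (List.range (Alist.length / c)).map (fun j =>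
        ((Alist.getD (b % (Alist.length / m) * m + s) []).drop (j * c)).take c) := by
    rw [List.getD_eq_getElem?_getD, List.getElem?_map]
    rw [List.getElem?_take, if_pos hr, List.getElem?_eq_getElem hrn]
    simp [List.getD_eq_getElem?_getD, List.getElem?_eq_getElem hrn]
  rw [hgget, List.getD_eq_getElem?_getD, List.getElem?_map, List.getElem?_range hja]
  simp [pvChunk]

theorem pvMainCase (Alist : List (List Int)) (m c : Nat) :
    makeBoxes Alist (m : Int) (c : Int) = makeBoxes_alt Alist (m : Int) (c : Int) := by
  rw [pvA_nat Alist m c, pvB_nat Alist m c]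
  apply List.ext_getElem?
  intro b
  rw [pvFoldlUpdGet]
  by_cases hb : b < Alist.length / c * (Alist.length / m)
  · have hinit : (pvInit Alist m c)[b]? = some [] := by
      simp [pvInit, hb]
    rw [hinit, List.getElem?_map, List.getElem?_range hb]
    simp [pvFilterA Alist m c b hb]
  · have h1 : (pvInit Alist m c)[b]? = none := by
      rw [List.getElem?_eq_none_iff]
      simp [pvInit]
      omega
    have h2 : ((List.range (Alist.length / c * (Alist.length / m))).map
        (pvG Alist m c (Alist.length / m)))[b]? = none := by
      rw [List.getElem?_eq_none_iff]
      simpa using Nat.le_of_not_lt hb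
    rw [h1, h2]
    rfl

theorem pvAEmptyOfTotalNonpos (Alist : List (List Int)) (bRows bCols : Int)
    (h : PySem.Int.floordiv (Alist.length : Int) bCols *
          PySem.Int.floordiv (Alist.length : Int) bRows ≤ 0) :
    makeBoxes Alist bRows bCols = [] := by
  simp only [makeBoxes]
  rw [PySem.List.pyRange_one_eq_nil h]
  rfl

theorem pvDegPosNeg (Alist : List (List Int)) (bRows bCols : Int)
    (hm : 0 < bRows) (hc : bCols < 0) :
    makeBoxes Alist bRows bCols = makeBoxes_alt Alist bRows bCols := by
  have hn : (0 : Int) ≤ (Alist.length : Int) := by positivity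
  have hac : PySem.Int.floordiv (Alist.length : Int) bCols ≤ 0 := pvFdivNonpos _ _ hn hc
  have hdw : 0 ≤ PySem.Int.floordiv (Alist.length : Int) bRows := Int.fdiv_nonneg hn hm.le
  rw [pvAEmptyOfTotalNonpos Alist bRows bCols (mul_nonpos_iff.mpr (Or.inr ⟨hac, hdw⟩))]
  simp only [makeBoxes_alt]
  rw [PySem.List.pyRange_one_eq_nil hac]
  rfl

theorem pvDegNegPos (Alist : List (List Int)) (bRows bCols : Int)
    (hm : bRows < 0) (hc : 0 < bCols) :
    makeBoxes Alist bRows bCols = makeBoxes_alt Alist bRows bCols := by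
  have hn : (0 : Int) ≤ (Alist.length : Int) := by positivity
  have hdw : PySem.Int.floordiv (Alist.length : Int) bRows ≤ 0 := pvFdivNonpos _ _ hn hm
  have hac : 0 ≤ PySem.Int.floordiv (Alist.length : Int) bCols := Int.fdiv_nonneg hn hc.le
  rw [pvAEmptyOfTotalNonpos Alist bRows bCols (mul_nonpos_iff.mpr (Or.inl ⟨hac, hdw⟩))]
  simp only [makeBoxes_alt]
  rw [PySem.List.pyRange_one_eq_nil hdw]
  simp

theorem pvDegEmpty (bRows bCols : Int) :
    makeBoxes [] bRows bCols = makeBoxes_alt [] bRows bCols := by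
  have h0 : ∀ x : Int, PySem.Int.floordiv (([] : List (List Int)).length : Int) x = 0 := by
    intro x
    show Int.fdiv 0 x = 0
    exact Int.zero_fdiv x
  rw [pvAEmptyOfTotalNonpos [] bRows bCols (by rw [h0, h0]; simp)]
  simp only [makeBoxes_alt]
  rw [h0, PySem.List.pyRange_one_eq_nil le_rfl]
  rfl

-- ===== VERDICT (by name: the statement is the Claim_ definition above) =====
theorem makeBoxes_spec : Claim_equal_makeBoxes := by
  intro Alist bRows bCols _ hpre
  obtain ⟨hr, hc, hdisj⟩ := hpre
  unfold Spec_makeBoxes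
  rcases lt_trichotomy bRows 0 with hrneg | hrzero | hrpos
  · rcases lt_trichotomy bCols 0 with hcneg | hczero | hcpos
    · have hnil : Alist = [] := by
        rcases hdisj with h | h | h
        · omega
        · omega
        · exact h
      subst hnil
      exact pvDegEmpty bRows bCols
    · exact absurd hczero hc
    · exact pvDegNegPos Alist bRows bCols hrneg hcpos
  · exact absurd hrzero hr
  · rcases lt_trichotomy bCols 0 with hcneg | hczero | hcpos
    · exact pvDegPosNeg Alist bRows bCols hrpos hcneg
    · exact absurd hczero hc
    · lift bRows to Nat using hrpos.le with m
      lift bCols to Nat using hcpos.le with c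
      exact pvMainCase Alist m c
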